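-- pv_equiv track=rewrite | github.com/Micheleww/scc2 | scc-top/tools/scc/ops/quarantine_untracked.py | _unique_top_targets
-- ===== SOURCE A (Python) =====
-- from typing import Any, Dict, Iterable, List, Optional, Tuple
--
-- def _match_any_prefix(path: str, prefixes: Iterable[str]) -> Optional[str]:
--     p = path.replace("\\", "/").strip().lstrip("./")
--     for pref in prefixes:
--         pr = pref.replace("\\", "/").strip().lstrip("./")
--         if not pr:
--             continue
--         if p == pr or p.startswith(pr + "/"):
--             return pref
--     return None
--
-- def _unique_top_targets(untracked: List[str], prefixes: List[str]) -> List[Tuple[str, str]]: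
--     """
--     Choose minimal move targets: prefer moving top-level directories when possible.
--     Returns list of (target_path, matched_prefix).
--     """
--     targets: Dict[str, str] = {}
--     for p in untracked:
--         m = _match_any_prefix(p, prefixes)
--         if not m:
--             continue
--         # Move at the prefix root (directory or file), not each individual file.
--         pref = m.replace("\\", "/").strip().lstrip("./")
--         targets[pref] = m
--     # Sort deeper first? We actually want to move broader first (top-level), but keep stable.
--     out = sorted(targets.items(), key=lambda kv: (kv[0].count("/"), kv[0].lower()))
--     return [(k, v) for k, v in out]
-- ===== SOURCE B (Python) =====
-- from typing import Dict, List, Tuple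
--
-- def _norm(s: str) -> str:
--     return s.replace("\\", "/").strip().lstrip("./")
--
-- def _unique_top_targets(untracked: List[str], prefixes: List[str]) -> List[Tuple[str, str]]:
--     """
--     Choose minimal move targets: prefer moving top-level directories when possible.
--     Returns list of (target_path, matched_prefix).
--
--     Faster: index the normalized prefixes once (first occurrence wins), then for
--     each path look up only its own ancestor prefixes in the index and keep the
--     candidate with the smallest prefix-list position -- O(P + N*D) instead of O(N*P).
--     """
--     idx: Dict[str, Tuple[int, str, str]] = {}
--     for i, pref in enumerate(prefixes):
--         pr = _norm(pref)
--         if pr and pr not in idx: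
--             idx[pr] = (i, pr, pref)
--     chosen: Dict[str, str] = {}
--     for path in untracked:
--         p = _norm(path)
--         best = None
--         for cand in [p] + [p[:j] for j in range(len(p)) if p[j] == "/"]:
--             c = idx.get(cand)
--             if c is not None and (best is None or c[0] < best[0]):
--                 best = c
--         if best is None:
--             continue
--         _, pr, pref = best
--         if pr not in chosen:
--             chosen[pr] = pref
--     out = sorted(chosen.items(), key=lambda kv: (kv[0].count("/"), kv[0].lower()))
--     return [(k, v) for k, v in out]
-- ===== Notes on version B (the rewrite author's own statement) =====
-- stated objective: faster
-- what changed: Instead of scanning the whole prefix list for every path, B builds a first-occurrence index of normalized prefixes once and, for each path, looks up only the path's own ancestor prefixes, keeping the candidate with the smallest prefix position.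
import Mathlib
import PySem

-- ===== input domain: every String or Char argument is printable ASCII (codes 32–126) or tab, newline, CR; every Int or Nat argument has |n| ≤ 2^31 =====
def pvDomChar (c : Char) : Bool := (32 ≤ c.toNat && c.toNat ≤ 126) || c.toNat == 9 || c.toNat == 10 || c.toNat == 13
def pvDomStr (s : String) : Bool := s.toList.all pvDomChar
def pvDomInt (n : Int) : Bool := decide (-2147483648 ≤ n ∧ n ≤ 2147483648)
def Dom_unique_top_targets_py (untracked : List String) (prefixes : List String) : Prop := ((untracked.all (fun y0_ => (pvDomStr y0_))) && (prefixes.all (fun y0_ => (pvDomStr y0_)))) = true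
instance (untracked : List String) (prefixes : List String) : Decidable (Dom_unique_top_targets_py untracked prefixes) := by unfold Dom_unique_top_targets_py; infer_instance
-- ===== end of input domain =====

-- B indexes the normalized prefixes once (first occurrence wins) and, per path, looks up only
-- the path's own ancestor prefixes, keeping the candidate with the smallest prefix position
-- (objective: faster — one pass over prefixes instead of one per path).

-- shared normalization helper: s.replace("\\", "/").strip().lstrip("./")
-- (both Pythons contain this exact computation; lstrip("./") is hand-ported:
--  it drops leading characters from the set {'.', '/'} — exact)
def pvNorm (s : String) : String :=
  String.ofList ((PySem.Str.strip (PySem.Str.replace s "\\" "/")).toList.dropWhile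
    (fun c => c == '.' || c == '/'))

-- ===== PORT A =====
-- the loop of _match_any_prefix, over an already-normalized path p
def matchAnyGo (p : String) : List String → Option String
  | [] => none
  | pref :: rest =>
    let pr := pvNorm pref
    if pr.toList.isEmpty then matchAnyGo p rest          -- `if not pr: continue`
    else if p == pr || PySem.Chars.startswith p.toList (pr.toList ++ ['/']) then some pref
    else matchAnyGo p rest

def matchAnyPrefix (path : String) (prefixes : List String) : Option String :=
  matchAnyGo (pvNorm path) prefixes

-- body of `for p in untracked: …` (targets[pref] = m)
def uttStepA (prefixes : List String) (d : PySem.Dict String String) (p : String) : PySem.Dict String String :=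
  match matchAnyPrefix p prefixes with
  | none => d                                            -- `if not m: continue` (m = None)
  | some m => if m == "" then d                          -- `if not m: continue` (m = "")
              else d.insert (pvNorm m) m

def unique_top_targets_py (untracked : List String) (prefixes : List String) : List (String × String) :=
  let targets : PySem.Dict String String :=
    untracked.foldl (uttStepA prefixes) PySem.Dict.empty
  let out := PySem.List.sorted2 targets.items
      (fun kv => PySem.Str.count kv.1 "/") (fun kv => PySem.Str.lower kv.1)
  out.map (fun kv => (kv.1, kv.2))

-- ===== PORT B =====
-- idx[pr] = (i, pr, pref) for the first prefix with that normalization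
def buildIdx : List (Int × String) → PySem.Dict String (Int × String × String) →
    PySem.Dict String (Int × String × String)
  | [], d => d
  | (i, pref) :: rest, d =>
    let pr := pvNorm pref
    buildIdx rest (if !pr.toList.isEmpty && !d.contains pr then d.insert pr (i, pr, pref) else d)

-- [p[:j] for j in range(len(p)) if p[j] == "/"]
def candPrefixes (p : String) : List String :=
  (List.range p.toList.length).filterMap
    (fun j => if p.toList[j]? == some '/' then some (String.ofList (p.toList.take j)) else none)

-- body of `for cand in …: c = idx.get(cand); if c is not None and (best is None or c[0] < best[0]): best = c`
def bestStep (idx : PySem.Dict String (Int × String × String))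
    (best : Option (Int × String × String)) (cand : String) : Option (Int × String × String) :=
  match idx.get? cand with
  | none => best
  | some c => match best with
              | none => some c
              | some b => if c.1 < b.1 then some c else best

-- body of `for path in untracked: …` (collect into chosen)
def uttStepB (idx : PySem.Dict String (Int × String × String))
    (d : PySem.Dict String String) (path : String) : PySem.Dict String String :=
  -- p = _norm(path); candidates are p itself and its '/'-bounded ancestors
  match (pvNorm path :: candPrefixes (pvNorm path)).foldl (bestStep idx) none with
  | none => d
  | some b => if d.contains b.2.1 then d else d.insert b.2.1 b.2.2

def unique_top_targets_py_alt (untracked : List String) (prefixes : List String) : List (String × String) :=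
  let idx := buildIdx (PySem.List.enumerate prefixes) PySem.Dict.empty
  let chosen : PySem.Dict String String :=
    untracked.foldl (uttStepB idx) PySem.Dict.empty
  let out := PySem.List.sorted2 chosen.items
      (fun kv => PySem.Str.count kv.1 "/") (fun kv => PySem.Str.lower kv.1)
  out.map (fun kv => (kv.1, kv.2))

-- ===== PRECONDITION & SPEC =====
def Spec_unique_top_targets_py (untracked : List String) (prefixes : List String) (out : List (String × String)) : Prop := out = unique_top_targets_py_alt untracked prefixes
instance (untracked : List String) (prefixes : List String) (out : List (String × String)) : Decidable (Spec_unique_top_targets_py untracked prefixes out) := by unfold Spec_unique_top_targets_py; infer_instance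

-- ===== CLAIM (what is proved, stated in full; the proofs are below) =====
def Claim_equal_unique_top_targets_py : Prop := ∀ (untracked : List String) (prefixes : List String), Dom_unique_top_targets_py untracked prefixes → Spec_unique_top_targets_py untracked prefixes (unique_top_targets_py untracked prefixes)

-- ===== LEMMAS AND PROOFS =====

-- `matches` as a predicate of the normalized prefix only
def pvMatchesN (p k : String) : Bool :=
  !k.toList.isEmpty && (p == k || PySem.Chars.startswith p.toList (k.toList ++ ['/']))

theorem matchAnyGo_eq_find? (p : String) (l : List String) :
    matchAnyGo p l = l.find? (fun pref => pvMatchesN p (pvNorm pref)) := by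
  induction l with
  | nil => rfl
  | cons pref rest ih =>
    rw [List.find?]
    cases hv : pvMatchesN p (pvNorm pref) with
    | true =>
      have hv' := hv
      simp only [pvMatchesN, Bool.and_eq_true, Bool.not_eq_true'] at hv'
      simp only [List.isEmpty_eq_false_iff] at hv'
      simp [matchAnyGo, hv'.1, hv'.2]
    | false =>
      have hv' := hv
      simp only [pvMatchesN, Bool.and_eq_false_iff, Bool.not_eq_false'] at hv'
      rcases hv' with h | h
      · simp [matchAnyGo, List.isEmpty_iff.1 h, ih]
      · by_cases he : (pvNorm pref).toList.isEmpty
        · simp [matchAnyGo, he, ih]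
        · simp [matchAnyGo, he, h, ih]

-- the candidate characterization
theorem mem_candPrefixes (p k : String) :
    k ∈ candPrefixes p ↔ ∃ j, ∃ h : j < p.toList.length, p.toList[j] = '/' ∧ k.toList = p.toList.take j := by
  constructor
  · intro hk
    simp only [candPrefixes, List.mem_filterMap, List.mem_range] at hk
    obtain ⟨j, hj, hif⟩ := hk
    rw [List.getElem?_eq_getElem hj] at hif
    by_cases hc : p.toList[j] = '/'
    · refine ⟨j, hj, hc, ?_⟩
      simp [hc] at hif
      rw [← hif, String.toList_ofList]
    · simp [hc] at hif
  · rintro ⟨j, hj, hc, hk⟩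
    simp only [candPrefixes, List.mem_filterMap, List.mem_range]
    refine ⟨j, hj, ?_⟩
    rw [List.getElem?_eq_getElem hj]
    simp only [hc, beq_self_eq_true, if_true, Option.some_inj]
    apply String.toList_injective
    rw [String.toList_ofList, hk]

theorem append_slash_prefix_iff (k cs : List Char) :
    (k ++ ['/']) <+: cs ↔ ∃ j, ∃ h : j < cs.length, cs[j] = '/' ∧ k = cs.take j := by
  constructor
  · rintro ⟨t, ht⟩
    refine ⟨k.length, ?_, ?_, ?_⟩
    · subst ht; simp
    · subst ht; simp [List.getElem_append_right (le_refl k.length)]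
    · subst ht; simp
  · rintro ⟨j, hj, hc, hk⟩
    subst hk
    refine ⟨cs.drop (j+1), ?_⟩
    rw [List.append_assoc]
    have : [cs[j]] ++ cs.drop (j+1) = cs.drop j := by
      rw [List.singleton_append, List.getElem_cons_drop hj]
    rw [hc] at this
    rw [this, List.take_append_drop]

-- L1: matching depends only on the normalized prefix, and means candidate membership
theorem pvMatchesN_iff (p k : String) :
    pvMatchesN p k = true ↔ k.toList ≠ [] ∧ k ∈ p :: candPrefixes p := by
  simp only [pvMatchesN, Bool.and_eq_true, Bool.not_eq_true', Bool.or_eq_true, beq_iff_eq,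
    List.isEmpty_eq_false_iff, List.mem_cons]
  constructor
  · rintro ⟨hne, hpk | hsw⟩
    · exact ⟨hne, Or.inl hpk.symm⟩
    · rw [PySem.Chars.startswith_iff, append_slash_prefix_iff] at hsw
      obtain ⟨j, hj, hc, hk⟩ := hsw
      exact ⟨hne, Or.inr ((mem_candPrefixes p k).2 ⟨j, hj, hc, hk⟩)⟩
  · rintro ⟨hne, hpk | hcand⟩
    · exact ⟨hne, Or.inl hpk.symm⟩
    · refine ⟨hne, Or.inr ?_⟩
      rw [PySem.Chars.startswith_iff, append_slash_prefix_iff]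
      exact (mem_candPrefixes p k).1 hcand

-- L2: lookups in the index built by buildIdx
theorem get?_buildIdx (l : List (Int × String)) (d : PySem.Dict String (Int × String × String)) (k : String) :
    (buildIdx l d).get? k =
      (d.get? k).or ((l.find? (fun ip => !(pvNorm ip.2).toList.isEmpty && (pvNorm ip.2 == k))).map
        (fun ip => (ip.1, pvNorm ip.2, ip.2))) := by
  induction l generalizing d with
  | nil => simp [buildIdx]
  | cons ip rest ih =>
    obtain ⟨i, pref⟩ := ip
    simp only [buildIdx, List.find?]
    by_cases he : (pvNorm pref).toList.isEmpty
    · rw [if_neg (by simp [he])]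
      simp only [he, Bool.not_true, Bool.false_and]
      rw [ih]
    · by_cases hk : pvNorm pref = k
      · subst hk
        by_cases hc : d.contains (pvNorm pref)
        · rw [if_neg (by simp [hc])]
          have hbe : (pvNorm pref == pvNorm pref) = true := by simp
          simp only [he, Bool.not_false, hbe, Bool.and_true]
          rw [ih]
          rw [PySem.Dict.contains_eq_isSome_get?] at hc
          obtain ⟨v, hv⟩ := Option.isSome_iff_exists.1 hc
          simp [hv]
        · rw [if_pos (by simp [he, hc])]
          rw [ih]
          rw [PySem.Dict.contains_eq_isSome_get?] at hc
          have hd : d.get? (pvNorm pref) = none := by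
            cases h : d.get? (pvNorm pref) <;> simp [h] at hc ⊢
          simp [PySem.Dict.get?_insert_self, hd, he]
      · have hbe : (pvNorm pref == k) = false := by simp [hk]
        simp only [hbe, Bool.and_false]
        by_cases hc2 : (!(pvNorm pref).toList.isEmpty && !d.contains (pvNorm pref)) = true
        · rw [if_pos hc2]
          rw [ih, PySem.Dict.get?_insert_of_ne _ _ (Ne.symm hk)]
        · rw [if_neg hc2]
          rw [ih]

-- F1: full characterization of idx lookups
theorem get?_idx_iff (prefixes : List String) (k : String) (v : Int × String × String) :
    (buildIdx (PySem.List.enumerate prefixes) PySem.Dict.empty).get? k = some v ↔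
      ∃ i, ∃ h : i < prefixes.length,
        v = ((i : Int), k, prefixes[i]) ∧ pvNorm prefixes[i] = k ∧ k.toList ≠ [] ∧
        ∀ j, (hj : j < i) → pvNorm prefixes[j] ≠ k := by
  rw [get?_buildIdx]
  simp only [PySem.Dict.get?_empty, Option.none_or, Option.map_eq_some_iff]
  constructor
  · rintro ⟨ip, hfind, hv⟩
    rw [List.find?_eq_some_iff_getElem] at hfind
    obtain ⟨hp, i, hi, hip, hmin⟩ := hfind
    rw [PySem.List.length_enumerate] at hi
    simp only [PySem.List.getElem_enumerate] at hip
    have hip2 : ip = ((i : Int), prefixes[i]) := by rw [← hip]; simp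
    subst hip2
    simp only [Bool.and_eq_true, Bool.not_eq_true', List.isEmpty_eq_false_iff, beq_iff_eq] at hp
    refine ⟨i, hi, ?_, hp.2, by rw [← hp.2]; exact hp.1, ?_⟩
    · rw [← hv]; simp [hp.2]
    · intro j hj hnorm
      have hjlen : j < prefixes.length := lt_trans hj hi
      have hmj := hmin j hj
      have hmj' : pvNorm prefixes[j] = "" ∨ ¬ pvNorm prefixes[j] = k := by
        simpa [PySem.List.getElem_enumerate] using hmj
      rcases hmj' with h1 | h2
      · rw [hnorm] at h1
        subst h1
        exact absurd hp.2 (by intro h; exact hp.1 (by rw [h]; rfl))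
      · exact absurd hnorm h2
  · rintro ⟨i, hi, hv, hnorm, hne, hmin⟩
    refine ⟨((i : Int), prefixes[i]), ?_, by rw [hv]; simp [hnorm]⟩
    rw [List.find?_eq_some_iff_getElem]
    refine ⟨by simp [hnorm, hne], i, by rw [PySem.List.length_enumerate]; exact hi, ?_, ?_⟩
    · rw [PySem.List.getElem_enumerate]; simp
    · intro j hj
      simp [PySem.List.getElem_enumerate, hmin j hj]

-- F2a: the best-candidate fold returns none iff no candidate is in the index
theorem bestStep_eq_none_iff (idx : PySem.Dict String (Int × String × String))
    (b : Option (Int × String × String)) (c : String) :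
    bestStep idx b c = none ↔ b = none ∧ idx.get? c = none := by
  cases hg : idx.get? c with
  | none => cases b <;> simp [bestStep, hg]
  | some w =>
    cases b with
    | none => simp [bestStep, hg]
    | some b0 =>
      simp only [bestStep, hg]
      split_ifs <;> simp

theorem foldl_best_none_iff (idx : PySem.Dict String (Int × String × String)) :
    ∀ (cs : List String) (b : Option (Int × String × String)),
    cs.foldl (bestStep idx) b = none ↔ (b = none ∧ ∀ c ∈ cs, idx.get? c = none) := by
  intro cs
  induction cs with
  | nil => intro b; simp
  | cons c cs ih =>
    intro b
    rw [List.foldl_cons, ih, bestStep_eq_none_iff]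
    constructor
    · rintro ⟨⟨hb, hc⟩, hall⟩
      refine ⟨hb, ?_⟩
      intro x hx
      rcases List.mem_cons.1 hx with rfl | hx
      · exact hc
      · exact hall x hx
    · rintro ⟨hb, hall⟩
      exact ⟨⟨hb, hall c (List.mem_cons_self)⟩, fun x hx => hall x (List.mem_cons_of_mem _ hx)⟩

-- F2b: one step of the best-candidate fold
theorem bestStep_cases (idx : PySem.Dict String (Int × String × String))
    (b : Option (Int × String × String)) (c : String) (u : Int × String × String)
    (h : bestStep idx b c = some u) :
    (b = some u ∨ idx.get? c = some u)
    ∧ (∀ w, b = some w → u.1 ≤ w.1)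
    ∧ (∀ w, idx.get? c = some w → u.1 ≤ w.1) := by
  cases hg : idx.get? c with
  | none =>
    simp only [bestStep, hg] at h
    refine ⟨Or.inl h, ?_, by simp⟩
    intro w hw
    rw [hw] at h
    cases h
    exact le_refl _
  | some cv =>
    cases b with
    | none =>
      simp only [bestStep, hg] at h
      cases h
      refine ⟨Or.inr rfl, by simp, ?_⟩
      intro w hw
      cases hw
      exact le_refl _
    | some b0 =>
      simp only [bestStep, hg] at h
      by_cases hlt : cv.1 < b0.1
      · rw [if_pos hlt] at h
        cases h
        refine ⟨Or.inr rfl, ?_, ?_⟩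
        · intro w hw; cases hw; exact le_of_lt hlt
        · intro w hw; cases hw; exact le_refl _
      · rw [if_neg hlt] at h
        cases h
        refine ⟨Or.inl rfl, ?_, ?_⟩
        · intro w hw; cases hw; exact le_refl _
        · intro w hw; cases hw; omega

-- F2: the best-candidate fold returns a minimum-index hit
theorem foldl_best_some (idx : PySem.Dict String (Int × String × String)) :
    ∀ (cs : List String) (b : Option (Int × String × String)) (v : Int × String × String),
    cs.foldl (bestStep idx) b = some v →
    (b = some v ∨ ∃ c ∈ cs, idx.get? c = some v)
    ∧ (∀ w, b = some w → v.1 ≤ w.1)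
    ∧ (∀ c ∈ cs, ∀ w, idx.get? c = some w → v.1 ≤ w.1) := by
  intro cs
  induction cs with
  | nil =>
    intro b v h
    simp only [List.foldl_nil] at h
    refine ⟨Or.inl h, ?_, by simp⟩
    intro w hw
    rw [h] at hw
    cases hw
    exact le_refl _
  | cons c cs ih =>
    intro b v h
    rw [List.foldl_cons] at h
    obtain ⟨hsrc, hble, hall⟩ := ih (bestStep idx b c) v h
    refine ⟨?_, ?_, ?_⟩
    · rcases hsrc with hb' | ⟨x, hx, hgx⟩
      · obtain ⟨hsrc2, _, _⟩ := bestStep_cases idx b c v hb'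
        rcases hsrc2 with hb | hc
        · exact Or.inl hb
        · exact Or.inr ⟨c, List.mem_cons_self, hc⟩
      · exact Or.inr ⟨x, List.mem_cons_of_mem _ hx, hgx⟩
    · intro w hw
      cases hu : bestStep idx b c with
      | none =>
        obtain ⟨hb, _⟩ := (bestStep_eq_none_iff idx b c).1 hu
        rw [hb] at hw
        cases hw
      | some u =>
        obtain ⟨_, hle, _⟩ := bestStep_cases idx b c u hu
        exact le_trans (hble u hu) (hle w hw)
    · intro x hx w hgw
      rcases List.mem_cons.1 hx with hxe | hx
      · subst hxe
        cases hu : bestStep idx b x with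
          | none =>
            obtain ⟨_, hg⟩ := (bestStep_eq_none_iff idx b x).1 hu
            rw [hg] at hgw
            cases hgw
          | some u =>
            obtain ⟨_, _, hle⟩ := bestStep_cases idx b x u hu
            exact le_trans (hble u hu) (hle w hgw)
      · exact hall x hx w hgw

-- C1: a successful scan of A pins the index entry at its normalized prefix
theorem idx_get_of_find (prefixes : List String) (p m : String)
    (hf : prefixes.find? (fun pref => pvMatchesN p (pvNorm pref)) = some m) :
    ∃ i : Nat, ∃ h : i < prefixes.length, prefixes[i] = m ∧
      (∀ j, (hj : j < i) → pvMatchesN p (pvNorm prefixes[j]) = false) ∧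
      (buildIdx (PySem.List.enumerate prefixes) PySem.Dict.empty).get? (pvNorm m) =
        some ((i : Int), pvNorm m, m) := by
  rw [List.find?_eq_some_iff_getElem] at hf
  obtain ⟨hm, i, hi, him, hmin⟩ := hf
  have hmm := (pvMatchesN_iff p (pvNorm m)).1 hm
  have hminf : ∀ j, (hj : j < i) → pvMatchesN p (pvNorm prefixes[j]) = false := by
    intro j hj
    have hmj := hmin j hj
    simpa using hmj
  refine ⟨i, hi, him, hminf, ?_⟩
  rw [get?_idx_iff]
  refine ⟨i, hi, by rw [him], by rw [him], hmm.1, ?_⟩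
  intro j hj hne
  have hmj := hminf j hj
  rw [hne] at hmj
  rw [hm] at hmj
  cases hmj

-- crux: per path, B's indexed minimum-position candidate is A's first matching prefix
theorem best_eq_match (prefixes : List String) (p : String) :
    ((p :: candPrefixes p).foldl
        (bestStep (buildIdx (PySem.List.enumerate prefixes) PySem.Dict.empty)) none).map
      (fun b => (b.2.1, b.2.2))
    = (matchAnyGo p prefixes).map (fun m => (pvNorm m, m)) := by
  rw [matchAnyGo_eq_find?]
  cases hf : prefixes.find? (fun pref => pvMatchesN p (pvNorm pref)) with
  | none =>
    have hres : (p :: candPrefixes p).foldl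
        (bestStep (buildIdx (PySem.List.enumerate prefixes) PySem.Dict.empty)) none = none := by
      rw [foldl_best_none_iff]
      refine ⟨rfl, ?_⟩
      intro c hc
      cases hv : (buildIdx (PySem.List.enumerate prefixes) PySem.Dict.empty).get? c with
      | none => rfl
      | some v =>
        exfalso
        rw [get?_idx_iff] at hv
        obtain ⟨i, hi, _, hnorm, hne, _⟩ := hv
        have hmatch : pvMatchesN p (pvNorm prefixes[i]) = true := by
          rw [hnorm]
          exact (pvMatchesN_iff p c).2 ⟨hne, hc⟩
        exact absurd hmatch (by simpa using List.find?_eq_none.1 hf prefixes[i] (prefixes.getElem_mem hi))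
    rw [hres]
    rfl
  | some m =>
    obtain ⟨i, hi, him, hminf, hC1⟩ := idx_get_of_find prefixes p m hf
    have hfm := List.find?_some hf
    have hmm := (pvMatchesN_iff p (pvNorm m)).1 hfm
    cases hres : (p :: candPrefixes p).foldl
        (bestStep (buildIdx (PySem.List.enumerate prefixes) PySem.Dict.empty)) none with
    | none =>
      exfalso
      rw [foldl_best_none_iff] at hres
      have := hres.2 (pvNorm m) hmm.2
      rw [hC1] at this
      cases this
    | some v =>
      obtain ⟨hsrc, _, hall⟩ := foldl_best_some _ _ none v hres
      rcases hsrc with hno | ⟨c, hc, hgc⟩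
      · cases hno
      rw [get?_idx_iff] at hgc
      obtain ⟨iv, hiv, hveq, hvnorm, hvne, hvmin⟩ := hgc
      have hmv : pvMatchesN p (pvNorm prefixes[iv]) = true := by
        rw [hvnorm]
        exact (pvMatchesN_iff p c).2 ⟨hvne, hc⟩
      have hile : i ≤ iv := by
        by_contra hgt
        have hmj := hminf iv (by omega)
        rw [hmv] at hmj
        cases hmj
      have hvi : v.1 = (iv : Int) := by rw [hveq]
      have hlei : v.1 ≤ (i : Int) := hall (pvNorm m) hmm.2 _ hC1
      have hieq : iv = i := by
        rw [hvi] at hlei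
        have : (iv : Int) ≤ (i : Int) := hlei
        omega
      subst hieq
      have hcm : c = pvNorm m := by rw [← hvnorm, him]
      rw [hveq, hcm, him]
      rfl

-- value determinism: re-inserting the stored value leaves the dict unchanged
theorem dict_insert_self_of_get? (d : PySem.Dict String String) (k : String) (v : String)
    (hnd : d.keys.Nodup) (h : d.get? k = some v) : d.insert k v = d := by
  apply PySem.Dict.ext
  rw [PySem.Dict.items_insert_of_contains d v
    (by rw [PySem.Dict.contains_eq_isSome_get?, h]; rfl)]
  have hkv : (k, v) ∈ d.items := PySem.Dict.mem_items_of_get?_eq_some d h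
  conv_rhs => rw [← List.map_id d.items]
  apply List.map_congr_left
  intro a ha
  by_cases hak : a.1 = k
  · have haeq : a = (k, v) :=
      List.inj_on_of_nodup_map (f := Prod.fst) (l := d.items) hnd ha hkv hak
    simp [haeq]
  · simp [hak]

-- pvNorm of the empty string is empty (so a matched prefix is never falsy)
theorem pvNorm_empty : pvNorm "" = "" := by rfl

-- the two collection loops build the same dict
set_option maxHeartbeats 1000000 in
theorem loops_eq (prefixes : List String) (l : List String) :
    ∀ (d : PySem.Dict String String), d.keys.Nodup →
    (∀ k v, d.get? k = some v →
      ∃ i : Int, (buildIdx (PySem.List.enumerate prefixes) PySem.Dict.empty).get? k = some (i, k, v)) →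
    l.foldl (uttStepA prefixes) d
      = l.foldl (uttStepB (buildIdx (PySem.List.enumerate prefixes) PySem.Dict.empty)) d := by
  induction l with
  | nil => intro d _ _; simp only [List.foldl_nil]
  | cons path rest ih =>
    intro d hnd hinv
    rw [List.foldl_cons, List.foldl_cons]
    have hbm := best_eq_match prefixes (pvNorm path)
    have hstep : uttStepA prefixes d path
          = uttStepB (buildIdx (PySem.List.enumerate prefixes) PySem.Dict.empty) d path
        ∧ (uttStepA prefixes d path).keys.Nodup
        ∧ (∀ k v, (uttStepA prefixes d path).get? k = some v →
            ∃ i : Int, (buildIdx (PySem.List.enumerate prefixes) PySem.Dict.empty).get? k = some (i, k, v)) := by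
      unfold uttStepA uttStepB matchAnyPrefix
      cases hf : matchAnyGo (pvNorm path) prefixes with
      | none =>
        rw [hf] at hbm
        have hfold : ((pvNorm path :: candPrefixes (pvNorm path)).foldl
            (bestStep (buildIdx (PySem.List.enumerate prefixes) PySem.Dict.empty)) none) = none := by
          cases hres : ((pvNorm path :: candPrefixes (pvNorm path)).foldl
              (bestStep (buildIdx (PySem.List.enumerate prefixes) PySem.Dict.empty)) none) with
          | none => rfl
          | some v => rw [hres] at hbm; cases hbm
        rw [hfold]
        exact ⟨rfl, hnd, hinv⟩
      | some m =>
        rw [hf] at hbm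
        have hfind : prefixes.find? (fun pref => pvMatchesN (pvNorm path) (pvNorm pref)) = some m := by
          rw [← matchAnyGo_eq_find?]
          exact hf
        obtain ⟨i, hi, him, _, hC1⟩ := idx_get_of_find prefixes (pvNorm path) m hfind
        have hfm := List.find?_some hfind
        have hmm := (pvMatchesN_iff (pvNorm path) (pvNorm m)).1 hfm
        have hmne : (m == "") = false := by
          rw [beq_eq_false_iff_ne]
          intro hme
          rw [hme, pvNorm_empty] at hmm
          exact hmm.1 rfl
        cases hres : ((pvNorm path :: candPrefixes (pvNorm path)).foldl
            (bestStep (buildIdx (PySem.List.enumerate prefixes) PySem.Dict.empty)) none) with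
        | none => rw [hres] at hbm; cases hbm
        | some v =>
          rw [hres] at hbm
          obtain ⟨hv21, hv22⟩ : v.2.1 = pvNorm m ∧ v.2.2 = m := by
            simp only [Option.map_some, Option.some.injEq, Prod.mk.injEq] at hbm
            exact hbm
          dsimp only
          rw [hmne, hv21, hv22]
          by_cases hcont : d.contains (pvNorm m)
          · rw [if_pos hcont, if_neg (by simp)]
            have hg : ∃ v0, d.get? (pvNorm m) = some v0 := by
              rw [PySem.Dict.contains_eq_isSome_get?] at hcont
              exact Option.isSome_iff_exists.1 hcont
            obtain ⟨v0, hv0⟩ := hg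
            obtain ⟨i', hi'⟩ := hinv (pvNorm m) v0 hv0
            have hv0m : v0 = m := by
              rw [hC1] at hi'
              exact (congrArg (fun t => t.2.2) (Option.some.inj hi')).symm
            rw [hv0m] at hv0
            have hins := dict_insert_self_of_get? d (pvNorm m) m hnd hv0
            exact ⟨hins, by rw [hins]; exact hnd, by rw [hins]; exact hinv⟩
          · rw [if_neg hcont, if_neg (by simp)]
            refine ⟨rfl, PySem.Dict.nodup_keys_insert d (pvNorm m) m hnd, ?_⟩
            intro k v' hkv'
            by_cases hk : k = pvNorm m
            · subst hk
              rw [PySem.Dict.get?_insert_self] at hkv'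
              cases hkv'
              exact ⟨(i : Int), hC1⟩
            · rw [PySem.Dict.get?_insert_of_ne _ _ hk] at hkv'
              exact hinv k v' hkv'
    exact (ih _ hstep.2.1 hstep.2.2).trans (by rw [hstep.1])

-- ===== VERDICT (by name: the statement is the Claim_ definition above) =====
theorem unique_top_targets_py_spec : Claim_equal_unique_top_targets_py := by
  intro untracked prefixes _
  show unique_top_targets_py untracked prefixes = unique_top_targets_py_alt untracked prefixes
  simp only [unique_top_targets_py, unique_top_targets_py_alt]
  rw [loops_eq prefixes untracked PySem.Dict.empty PySem.Dict.nodup_keys_empty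
    (by intro k v h; rw [PySem.Dict.get?_empty] at h; cases h)]
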